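-- pv_equiv track=rewrite | github.com/cneha2301-byte/neha-api | scripts/redistribute_tags_equal.py | get_current_tags
-- ===== SOURCE A (Python) =====
-- TAGS = [
--     '@CoreBusinessOperations',
--     '@MasterDataManagement',
--     '@ConfigurationSettings',
--     '@ReportsAnalytics',
--     '@SupportingFunctions'
-- ]
--
-- def get_current_tags(line):
--     """Extract current tags from the first line of a feature file."""
--     # First, split by spaces
--     tags = line.strip().split()
--     filtered_tags = []
--
--     for tag in tags:
--         # Check if tag contains multiple @ symbols (concatenated tags)
--         if '@' in tag and tag.count('@') > 1:
--             # Split concatenated tags like "@SupportingFunctions@ActivitiesManagement"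
--             parts = tag.split('@')
--             for i, part in enumerate(parts[1:], 1):  # Skip first empty part
--                 sub_tag = f'@{part}'
--                 if sub_tag == '@BizomWebAPI':
--                     filtered_tags.append(sub_tag)
--                 elif sub_tag not in TAGS:
--                     filtered_tags.append(sub_tag)
--         elif tag == '@BizomWebAPI':
--             filtered_tags.append(tag)
--         elif tag not in TAGS:
--             # Keep non-category tags
--             filtered_tags.append(tag)
--         # Skip all category tags - we'll replace them with the new one
--
--     return filtered_tags
-- ===== SOURCE B (Python) =====
-- TAGS = [
--     '@CoreBusinessOperations',
--     '@MasterDataManagement',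
--     '@ConfigurationSettings',
--     '@ReportsAnalytics',
--     '@SupportingFunctions'
-- ]
--
-- def get_current_tags(line):
--     """Extract current tags from the first line of a feature file."""
--     # Pass 1: normalize tokens into candidate tags (split concatenated multi-@ tokens).
--     candidates = []
--     for tok in line.strip().split():
--         if tok.count('@') > 1:
--             candidates.extend('@' + p for p in tok.split('@')[1:])
--         else:
--             candidates.append(tok)
--     # Pass 2: drop category tags.
--     return [c for c in candidates if c not in TAGS]
-- ===== Notes on version B (the rewrite author's own statement) =====
-- stated objective: simpler
-- what changed: Replaced the nested-branch single pass with a two-stage pipeline: first flatten multi-at tokens into a candidate list, then one filter against TAGS; the special case for the BizomWebAPI tag (already kept by the filter) and the redundant substring-membership guard disappear.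
import Mathlib
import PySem

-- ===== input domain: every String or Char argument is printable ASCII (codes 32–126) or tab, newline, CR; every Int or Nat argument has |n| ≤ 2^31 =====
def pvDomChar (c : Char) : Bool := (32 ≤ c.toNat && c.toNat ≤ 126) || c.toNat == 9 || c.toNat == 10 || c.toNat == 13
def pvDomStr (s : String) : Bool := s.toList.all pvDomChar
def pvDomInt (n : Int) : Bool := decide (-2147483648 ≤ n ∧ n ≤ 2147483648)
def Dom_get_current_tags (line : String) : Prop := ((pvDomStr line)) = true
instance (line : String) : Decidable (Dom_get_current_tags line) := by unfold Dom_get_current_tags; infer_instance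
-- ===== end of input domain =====

-- B replaces A's nested-branch single pass by a two-stage pipeline (flatten multi-@ tokens,
-- then filter against TAGS), dropping the redundant BizomWebAPI special case and membership guard: simpler.

def pvTAGS : List String :=
  ["@CoreBusinessOperations", "@MasterDataManagement", "@ConfigurationSettings",
   "@ReportsAnalytics", "@SupportingFunctions"]

-- ===== PORT A =====
def get_current_tags (line : String) : List String :=
  (PySem.Str.split₀ (PySem.Str.strip line)).foldl (fun filtered_tags tag =>
    if PySem.Str.isIn "@" tag = true ∧ 1 < PySem.Str.count tag "@" then
      ((((PySem.Str.split? tag "@").getD []).drop 1)).foldl (fun fl part =>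
        let sub_tag := "@" ++ part
        if sub_tag = "@BizomWebAPI" then fl ++ [sub_tag]
        else if sub_tag ∉ pvTAGS then fl ++ [sub_tag]
        else fl) filtered_tags
    else if tag = "@BizomWebAPI" then filtered_tags ++ [tag]
    else if tag ∉ pvTAGS then filtered_tags ++ [tag]
    else filtered_tags) []

-- ===== PORT B =====
def get_current_tags_alt (line : String) : List String :=
  let candidates :=
    (PySem.Str.split₀ (PySem.Str.strip line)).foldl (fun cs tok =>
      cs ++ (if 1 < PySem.Str.count tok "@" then
                (((PySem.Str.split? tok "@").getD []).drop 1).map (fun p => "@" ++ p)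
              else [tok])) []
  candidates.filter (fun c => decide (c ∉ pvTAGS))

-- ===== PRECONDITION & SPEC =====
def Spec_get_current_tags (line : String) (out : List String) : Prop := out = get_current_tags_alt line
instance (line : String) (out : List String) : Decidable (Spec_get_current_tags line out) := by unfold Spec_get_current_tags; infer_instance

-- ===== CLAIM (what is proved, stated in full; the proofs are below) =====
def Claim_equal_get_current_tags : Prop := ∀ (line : String), Dom_get_current_tags line → Spec_get_current_tags line (get_current_tags line)

-- ===== LEMMAS AND PROOFS =====

-- the candidate expansion of one token (B's pass 1) and the kept-predicate (B's pass 2)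
def pvExpand (tok : String) : List String :=
  if 1 < PySem.Str.count tok "@" then
    (((PySem.Str.split? tok "@").getD []).drop 1).map (fun p => "@" ++ p)
  else [tok]

def pvKeep (c : String) : Bool := decide (c ∉ pvTAGS)

-- a nonempty pattern that is not an infix is never counted
theorem pv_countgo_zero (sub : List Char) (fuel : Nat) (l : List Char) (acc : Nat)
    (h : ¬ sub <:+: l) : PySem.Chars.count.go sub fuel l acc = acc := by
  induction fuel generalizing l acc with
  | zero => simp [PySem.Chars.count.go]
  | succ n ih =>
    cases l with
    | nil => simp [PySem.Chars.count.go]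
    | cons x t =>
      rw [PySem.Chars.count.go]
      have hnp : sub.isPrefixOf (x :: t) = false := by
        cases hp : sub.isPrefixOf (x :: t) with
        | false => rfl
        | true => exact absurd ((List.isPrefixOf_iff_prefix.mp hp).isInfix) h
      rw [hnp]
      simp only [Bool.false_eq_true, if_false]
      exact ih t acc (fun hi => h (hi.trans (t.suffix_cons x).isInfix))

-- if '@' does not occur in a token then its '@'-count is 0
theorem pv_count_zero_of_not_isIn (t : String) (h : PySem.Str.isIn "@" t = false) :
    PySem.Str.count t "@" = 0 := by
  have hinf : ¬ ("@".toList <:+: t.toList) := Iff.mp (PySem.Chars.isIn_eq_false_iff _ _) (by simpa using h)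
  have : PySem.Chars.count t.toList "@".toList = 0 := by
    rw [PySem.Chars.count]
    rw [if_neg (by decide)]
    exact pv_countgo_zero _ _ _ _ hinf
  simpa using this

-- A's inner loop over the parts of a multi-@ token = append the filtered mapped parts
theorem pv_inner_fold (l : List String) (acc : List String) :
    l.foldl (fun fl part =>
        let sub_tag := "@" ++ part
        if sub_tag = "@BizomWebAPI" then fl ++ [sub_tag]
        else if sub_tag ∉ pvTAGS then fl ++ [sub_tag]
        else fl) acc
      = acc ++ (l.map (fun p => "@" ++ p)).filter pvKeep := by
  induction l generalizing acc with
  | nil => simp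
  | cons x xs ih =>
    simp only [List.foldl_cons, List.map_cons, List.filter_cons]
    by_cases hb : ("@" ++ x) = "@BizomWebAPI"
    · have hk : pvKeep ("@" ++ x) = true := by
        rw [hb]; decide
      rw [if_pos hb, hk, ih]
      simp
    · rw [if_neg hb]
      by_cases hm : ("@" ++ x) ∉ pvTAGS
      · have hk : pvKeep ("@" ++ x) = true := by simp [pvKeep, hm]
        rw [if_pos hm, hk, ih]
        simp
      · have hk : pvKeep ("@" ++ x) = false := by simp [pvKeep] at hm ⊢; exact hm
        rw [if_neg hm, hk, ih]
        simp

-- "@BizomWebAPI" is not a category tag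
theorem pv_bizom_kept : pvKeep "@BizomWebAPI" = true := by decide

-- A's body on one token appends exactly the filtered expansion of that token
theorem pv_step (acc : List String) (tag : String) :
    (if PySem.Str.isIn "@" tag = true ∧ 1 < PySem.Str.count tag "@" then
      ((((PySem.Str.split? tag "@").getD []).drop 1)).foldl (fun fl part =>
        let sub_tag := "@" ++ part
        if sub_tag = "@BizomWebAPI" then fl ++ [sub_tag]
        else if sub_tag ∉ pvTAGS then fl ++ [sub_tag]
        else fl) acc
    else if tag = "@BizomWebAPI" then acc ++ [tag]
    else if tag ∉ pvTAGS then acc ++ [tag]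
    else acc)
      = acc ++ (pvExpand tag).filter pvKeep := by
  by_cases hc : 1 < PySem.Str.count tag "@"
  · have hin : PySem.Str.isIn "@" tag = true := by
      cases hi : PySem.Str.isIn "@" tag with
      | true => rfl
      | false => rw [pv_count_zero_of_not_isIn tag hi] at hc; omega
    rw [if_pos ⟨hin, hc⟩, pv_inner_fold, pvExpand, if_pos hc]
  · have hnc : ¬ (PySem.Str.isIn "@" tag = true ∧ 1 < PySem.Str.count tag "@") :=
      fun h => hc h.2
    rw [if_neg hnc, pvExpand, if_neg hc]
    by_cases hb : tag = "@BizomWebAPI"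
    · rw [if_pos hb, List.filter_cons]
      rw [hb, pv_bizom_kept]
      simp
    · rw [if_neg hb, List.filter_cons]
      by_cases hm : tag ∉ pvTAGS
      · have hk : pvKeep tag = true := by simp [pvKeep, hm]
        rw [if_pos hm, hk]
        simp
      · have hk : pvKeep tag = false := by simp [pvKeep] at hm ⊢; exact hm
        rw [if_neg hm, hk]
        simp

-- A's outer loop = filtered flatMap of the expansions
theorem pv_outer_fold (toks : List String) (acc : List String) :
    toks.foldl (fun filtered_tags tag =>
      if PySem.Str.isIn "@" tag = true ∧ 1 < PySem.Str.count tag "@" then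
        ((((PySem.Str.split? tag "@").getD []).drop 1)).foldl (fun fl part =>
          let sub_tag := "@" ++ part
          if sub_tag = "@BizomWebAPI" then fl ++ [sub_tag]
          else if sub_tag ∉ pvTAGS then fl ++ [sub_tag]
          else fl) filtered_tags
      else if tag = "@BizomWebAPI" then filtered_tags ++ [tag]
      else if tag ∉ pvTAGS then filtered_tags ++ [tag]
      else filtered_tags) acc
      = acc ++ (toks.flatMap pvExpand).filter pvKeep := by
  induction toks generalizing acc with
  | nil => simp
  | cons t ts ih =>
    simp only [List.foldl_cons, List.flatMap_cons, List.filter_append]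
    rw [pv_step, ih, List.append_assoc]

-- ===== VERDICT (by name: the statement is the Claim_ definition above) =====
theorem get_current_tags_spec : Claim_equal_get_current_tags := by
  intro line _
  unfold Spec_get_current_tags get_current_tags get_current_tags_alt
  rw [pv_outer_fold, PySem.List.foldl_append_eq_flatMap]
  simp only [List.nil_append]
  have he : pvExpand = (fun tok => if 1 < PySem.Str.count tok "@" then
      (((PySem.Str.split? tok "@").getD []).drop 1).map (fun p => "@" ++ p) else [tok]) := rfl
  have hk : pvKeep = (fun c => decide (c ∉ pvTAGS)) := rfl
  rw [he, hk]
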